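-- pv_equiv track=rewrite | github.com/mjmwandla/regime-switching | regime_app.py | compute_sojourn_times
-- ===== SOURCE A (Python) =====
-- def compute_sojourn_times(labels):
--     """Compute list of (regime, duration) for consecutive runs."""
--     sojourns = []
--     current = labels[0]
--     count = 1
--     for i in range(1, len(labels)):
--         if labels[i] == current:
--             count += 1
--         else:
--             sojourns.append((current, count))
--             current = labels[i]
--             count = 1
--     sojourns.append((current, count))
--     return sojourns
-- ===== SOURCE B (Python) =====
-- def compute_sojourn_times(labels):
--     """Compute list of (regime, duration) for consecutive runs."""
--     n = len(labels)
--     boundaries = [0] + [i for i in range(1, n) if labels[i] != labels[i - 1]] + [n]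
--     return [(labels[boundaries[j]], boundaries[j + 1] - boundaries[j])
--             for j in range(len(boundaries) - 1)]
-- ===== Notes on version B (the rewrite author's own statement) =====
-- stated objective: alternative
-- what changed: B is a staged two-pass boundary method: it first builds the list of run boundaries (index zero, every change point where a label differs from its predecessor, and the length), then derives each (regime, duration) pair as a difference of consecutive boundary indices, instead of A's incremental current/count accumulator.
import Mathlib
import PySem

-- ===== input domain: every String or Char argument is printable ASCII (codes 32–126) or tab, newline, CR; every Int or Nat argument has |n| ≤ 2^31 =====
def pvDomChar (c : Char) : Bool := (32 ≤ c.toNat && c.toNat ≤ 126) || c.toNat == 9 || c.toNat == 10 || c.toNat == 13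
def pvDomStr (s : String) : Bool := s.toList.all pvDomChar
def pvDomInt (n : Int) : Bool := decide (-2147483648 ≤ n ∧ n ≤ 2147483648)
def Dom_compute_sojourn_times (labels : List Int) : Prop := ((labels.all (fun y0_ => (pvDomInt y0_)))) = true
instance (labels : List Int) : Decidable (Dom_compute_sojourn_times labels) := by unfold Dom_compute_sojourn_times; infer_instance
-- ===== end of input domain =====

-- B replaces A's incremental current/count pass by a staged two-pass boundary method (change points first, durations as index differences); same O(n) cost, different decomposition.

-- ===== PORT A =====
-- one loop-body step of A: v is labels[i], state = (sojourns, current, count)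
def pvStepA (st : List (Int × Int) × Int × Int) (v : Int) : List (Int × Int) × Int × Int :=
  if v = st.2.1 then (st.1, st.2.1, st.2.2 + 1)
  else (st.1 ++ [(st.2.1, st.2.2)], v, 1)

def compute_sojourn_times (labels : List Int) : List (Int × Int) :=
  match PySem.List.pyGet? labels 0 with
  | none => []  -- Python raises IndexError here (reading the first element of an empty list); excluded by Pre_
  | some cur0 =>
    let st := (PySem.List.pyRange 1 (labels.length : Int) 1).foldl
      (fun st i => pvStepA st (PySem.List.pyGetD labels i 0)) ([], cur0, 1)
    st.1 ++ [(st.2.1, st.2.2)]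

-- ===== PORT B =====
-- indexing via pyGetD with default 0: exact on Pre_ (nonempty labels), where every index used is in range
def compute_sojourn_times_alt (labels : List Int) : List (Int × Int) :=
  let n : Int := (labels.length : Int)
  let bnds : List Int :=
    [0] ++ (PySem.List.pyRange 1 n 1).filter
      (fun i => PySem.List.pyGetD labels i 0 ≠ PySem.List.pyGetD labels (i - 1) 0) ++ [n]
  (PySem.List.pyRange 0 ((bnds.length : Int) - 1) 1).map
    (fun j => (PySem.List.pyGetD labels (PySem.List.pyGetD bnds j 0) 0,
               PySem.List.pyGetD bnds (j + 1) 0 - PySem.List.pyGetD bnds j 0))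

-- ===== PRECONDITION & SPEC =====
-- Pre_ excludes only the empty list, on which A raises IndexError reading the first element.
def Pre_compute_sojourn_times (labels : List Int) : Prop := labels ≠ []
instance (labels : List Int) : Decidable (Pre_compute_sojourn_times labels) := by unfold Pre_compute_sojourn_times; infer_instance
def pvWitness_compute_sojourn_times : List Int := [1, 1, 2]

def Spec_compute_sojourn_times (labels : List Int) (out : List (Int × Int)) : Prop := out = compute_sojourn_times_alt labels
instance (labels : List Int) (out : List (Int × Int)) : Decidable (Spec_compute_sojourn_times labels out) := by unfold Spec_compute_sojourn_times; infer_instance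

-- ===== CLAIM (what is proved, stated in full; the proofs are below) =====
def Claim_equal_compute_sojourn_times : Prop := ∀ (labels : List Int), Dom_compute_sojourn_times labels → Pre_compute_sojourn_times labels → Spec_compute_sojourn_times labels (compute_sojourn_times labels)

-- ===== LEMMAS AND PROOFS =====

-- canonical run-length encoding both ports are reduced to
def pvRle : List Int → List (Int × Int)
  | [] => []
  | x :: xs => (x, 1 + ((xs.takeWhile (· == x)).length : Int)) :: pvRle (xs.dropWhile (· == x))
termination_by l => l.length
decreasing_by
  have := List.length_dropWhile_le (· == x) xs
  simp only [List.length_cons]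
  omega

-- ===== A side =====

theorem pvFoldA : ∀ (xs : List Int) (acc : List (Int × Int)) (x c : Int),
    (xs.foldl pvStepA (acc, x, c)).1 ++ [((xs.foldl pvStepA (acc, x, c)).2.1, (xs.foldl pvStepA (acc, x, c)).2.2)]
      = acc ++ (x, c + ((xs.takeWhile (· == x)).length : Int)) :: pvRle (xs.dropWhile (· == x)) := by
  intro xs
  induction xs with
  | nil => intro acc x c; simp [pvRle]
  | cons v vs ih =>
    intro acc x c
    by_cases hv : v = x
    · subst hv
      simp only [List.foldl_cons, pvStepA, if_true]
      rw [ih acc v (c + 1)]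
      simp
      ring_nf
    · have hb : (v == x) = false := by simp [hv]
      simp only [List.foldl_cons, pvStepA, if_neg hv]
      rw [ih (acc ++ [(x, c)]) v 1]
      simp [hb, pvRle, List.append_assoc]

theorem pvA_eq_rle (x : Int) (xs : List Int) :
    compute_sojourn_times (x :: xs) = pvRle (x :: xs) := by
  have h0 : PySem.List.pyGet? (x :: xs) 0 = some x := by
    simp [PySem.List.pyGet?, PySem.List.pyIdx?]
  unfold compute_sojourn_times
  rw [h0]
  dsimp only
  rw [PySem.List.foldl_pyRange_pyGetD' (x :: xs) (0 : Int) pvStepA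
      (([], x, 1) : List (Int × Int) × Int × Int) (a := 1) (by omega)]
  simp only [Int.toNat_one, List.drop_succ_cons, List.drop_zero]
  rw [pvFoldA xs [] x 1]
  rw [show pvRle (x :: xs) = (x, 1 + ((xs.takeWhile (· == x)).length : Int)) :: pvRle (xs.dropWhile (· == x)) from by rw [pvRle]]
  simp

-- ===== B side =====

-- change points of the suffix s, whose predecessor element is prev, starting at index i
def pvCps (prev : Int) : List Int → Int → List Int
  | [], _ => []
  | v :: vs, i => if v = prev then pvCps v vs (i + 1) else i :: pvCps v vs (i + 1)

-- labels[j] read off a drop equation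
theorem pvDropGet (labels : List Int) (j : Int) (v : Int) (vs : List Int)
    (hj : 0 ≤ j) (hd : labels.drop j.toNat = v :: vs) :
    PySem.List.pyGetD labels j 0 = v := by
  have h1 : labels[j.toNat]? = some v := by
    have h2 : (labels.drop j.toNat)[0]? = labels[j.toNat + 0]? := List.getElem?_drop
    rw [hd] at h2
    simpa using h2.symm
  rw [PySem.List.pyGetD_of_nonneg labels 0 hj]
  simp [List.getD_eq_getElem?_getD, h1]

theorem pvDropLt (labels : List Int) (j : Int) (v : Int) (vs : List Int)
    (hd : labels.drop j.toNat = v :: vs) : j.toNat < labels.length := by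
  by_contra hge
  rw [not_lt] at hge
  have : labels.drop j.toNat = [] := by simp [List.drop_eq_nil_iff, hge]
  rw [this] at hd; exact absurd hd.symm (List.cons_ne_nil v vs)

theorem pvDropLen (labels : List Int) (j : Int) (s : List Int)
    (hd : labels.drop j.toNat = s) (hlt : j.toNat ≤ labels.length) :
    labels.length = j.toNat + s.length := by
  have := congrArg List.length hd
  simp [List.length_drop] at this
  omega

-- the boundary comprehension computes pvCps
theorem pvFilt (labels : List Int) :
    ∀ (s : List Int) (prev : Int) (j : Int), 1 ≤ j →
      labels.drop (j - 1).toNat = prev :: s →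
      (PySem.List.pyRange j (labels.length : Int) 1).filter
        (fun i => PySem.List.pyGetD labels i 0 ≠ PySem.List.pyGetD labels (i - 1) 0)
        = pvCps prev s j := by
  intro s
  induction s with
  | nil =>
    intro prev j hj hd
    have hlen : labels.length = (j - 1).toNat + 1 :=
      pvDropLen labels (j - 1) [prev] hd (le_of_lt (pvDropLt labels (j - 1) prev [] hd))
    rw [PySem.List.pyRange_one_eq_nil (by omega)]
    simp [pvCps]
  | cons v vs ih =>
    intro prev j hj hd
    have hlt : (j - 1).toNat < labels.length := pvDropLt labels (j - 1) prev (v :: vs) hd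
    have hgp : PySem.List.pyGetD labels (j - 1) 0 = prev := pvDropGet labels (j - 1) prev (v :: vs) (by omega) hd
    have hdj : labels.drop j.toNat = v :: vs := by
      have h3 : j.toNat = (j - 1).toNat + 1 := by omega
      rw [h3, ← List.drop_drop, hd]
      simp
    have hgv : PySem.List.pyGetD labels j 0 = v := pvDropGet labels j v vs (by omega) hdj
    have hjlt : j < (labels.length : Int) := by
      have := pvDropLt labels j v vs hdj; omega
    rw [PySem.List.pyRange_one_cons hjlt]
    rw [List.filter_cons]
    have hdj' : labels.drop ((j + 1) - 1).toNat = v :: vs := by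
      simpa using hdj
    rw [ih v (j + 1) (by omega) hdj']
    by_cases hvp : v = prev <;> simp [pvCps, hgv, hgp, hvp]

-- the index map over a boundary list is the map over adjacent pairs
theorem pvZipMap (labels b : List Int) :
    (PySem.List.pyRange 0 ((b.length : Int) - 1) 1).map
      (fun j => (PySem.List.pyGetD labels (PySem.List.pyGetD b j 0) 0,
                 PySem.List.pyGetD b (j + 1) 0 - PySem.List.pyGetD b j 0))
      = (b.zip b.tail).map (fun p => (PySem.List.pyGetD labels p.1 0, p.2 - p.1)) := by
  apply List.ext_getElem
  · simp [PySem.List.length_pyRange_one, List.length_zip, List.length_tail]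
  · intro k h1 h2
    have hk : k < b.length - 1 := by
      simp [PySem.List.length_pyRange_one] at h1
      omega
    simp only [List.getElem_map, PySem.List.getElem_pyRange_one]
    have hb0 : PySem.List.pyGetD b ((0 : Int) + (k : Int)) 0 = b[k]'(by omega) := by
      have h4 : (0 : Int) + (k : Int) = ((k : Nat) : Int) := by omega
      rw [h4, PySem.List.pyGetD_natCast]
      simp [List.getD_eq_getElem?_getD, List.getElem?_eq_getElem (by omega : k < b.length)]
    have hb1 : PySem.List.pyGetD b ((0 : Int) + (k : Int) + 1) 0 = b[k + 1]'(by omega) := by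
      have h4 : (0 : Int) + (k : Int) + 1 = ((k + 1 : Nat) : Int) := by omega
      rw [h4, PySem.List.pyGetD_natCast]
      simp [List.getD_eq_getElem?_getD, List.getElem?_eq_getElem (by omega : k + 1 < b.length)]
    rw [hb0, hb1]
    simp [List.getElem_zip, List.getElem_tail]

-- pvCps skips a block of elements equal to prev
theorem pvCps_skip : ∀ (t : List Int) (prev : Int) (rest : List Int) (i : Int),
    (∀ z ∈ t, z = prev) → pvCps prev (t ++ rest) i = pvCps prev rest (i + (t.length : Int)) := by
  intro t
  induction t with
  | nil => intro prev rest i _; simp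
  | cons u us ih =>
    intro prev rest i hall
    have hu : u = prev := hall u (by simp)
    have hrec := ih prev rest (i + 1) (fun z hz => hall z (by simp [hz]))
    rw [List.cons_append]
    rw [show pvCps prev (u :: (us ++ rest)) i = pvCps u (us ++ rest) (i + 1) from by
      simp [pvCps, hu]]
    rw [hu, hrec]
    exact congrArg (pvCps prev rest) (by push_cast [List.length_cons]; ring)

-- head of a dropWhile fails the predicate
theorem pvDropWhileHeadNe (v y : Int) (ys vs : List Int)
    (hdm : vs.dropWhile (· == v) = y :: ys) : y ≠ v := by
  have hne : vs.dropWhile (· == v) ≠ [] := by rw [hdm]; simp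
  have h := List.head_dropWhile_not (· == v) hne
  have h9 : (vs.dropWhile (· == v)).head hne = y := by
    have h10 : (vs.dropWhile (· == v)).head? = some y := by rw [hdm]; rfl
    rw [List.head?_eq_some_head hne] at h10
    exact Option.some_inj.mp h10
  rw [h9] at h
  simpa using h

-- main run recursion: adjacent boundary pairs of a suffix give its RLE
theorem pvMain (labels : List Int) :
    ∀ (k : Nat) (v : Int) (vs : List Int) (j : Int), (v :: vs).length ≤ k → 0 ≤ j →
      labels.drop j.toNat = v :: vs →
      (((j :: (pvCps v vs (j + 1) ++ [(labels.length : Int)])).zip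
          (pvCps v vs (j + 1) ++ [(labels.length : Int)])).map
        (fun p => (PySem.List.pyGetD labels p.1 0, p.2 - p.1)))
        = pvRle (v :: vs) := by
  intro k
  induction k with
  | zero => intro v vs j hk _ _; simp at hk
  | succ k ih =>
    intro v vs j hk hj hd
    have hgv : PySem.List.pyGetD labels j 0 = v := pvDropGet labels j v vs hj hd
    have hlen : labels.length = j.toNat + (v :: vs).length :=
      pvDropLen labels j (v :: vs) hd (le_of_lt (pvDropLt labels j v vs hd))
    rw [show pvRle (v :: vs) = (v, 1 + ((vs.takeWhile (· == v)).length : Int)) :: pvRle (vs.dropWhile (· == v)) from by rw [pvRle]]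
    cases hdm : vs.dropWhile (· == v) with
    | nil =>
      have htv : vs.takeWhile (· == v) = vs := by
        have h5 := List.takeWhile_append_dropWhile (p := (· == v)) (l := vs)
        rw [hdm] at h5; simpa using h5
      have hall : ∀ z ∈ vs, z = v := by
        intro z hz
        have h6 := List.mem_takeWhile_imp (htv ▸ hz)
        simpa using h6
      have hcps : pvCps v vs (j + 1) = [] := by
        have h7 := pvCps_skip vs v [] (j + 1) hall
        simpa [pvCps] using h7
      rw [hcps, htv]
      simp only [List.length_cons] at hlen
      simp [pvRle, hgv]
      omega
    | cons y ys =>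
      have hyv : y ≠ v := pvDropWhileHeadNe v y ys vs hdm
      have hsplit : vs.takeWhile (· == v) ++ y :: ys = vs := by
        have h5 := List.takeWhile_append_dropWhile (p := (· == v)) (l := vs)
        rw [hdm] at h5; exact h5
      have hallt : ∀ z ∈ vs.takeWhile (· == v), z = v := by
        intro z hz
        have h6 := List.mem_takeWhile_imp hz
        simpa using h6
      have hcps : pvCps v vs (j + 1)
          = pvCps v (y :: ys) (j + 1 + ((vs.takeWhile (· == v)).length : Int)) := by
        conv_lhs => rw [← hsplit]
        exact pvCps_skip (vs.takeWhile (· == v)) v (y :: ys) (j + 1) hallt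
      have h9 : (vs.takeWhile (· == v) ++ y :: ys).drop (vs.takeWhile (· == v)).length = y :: ys :=
        List.drop_left
      rw [hsplit] at h9
      have hdd : labels.drop (j + 1 + ((vs.takeWhile (· == v)).length : Int)).toNat = y :: ys := by
        have h7 : (j + 1 + ((vs.takeWhile (· == v)).length : Int)).toNat
            = j.toNat + ((vs.takeWhile (· == v)).length + 1) := by omega
        rw [h7, ← List.drop_drop, hd]
        simp only [List.drop_succ_cons]
        exact h9
      have hlenys : ys.length + 1 + (vs.takeWhile (· == v)).length = vs.length := by
        have := congrArg List.length hsplit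
        simp at this
        omega
      have hrec := ih y ys (j + 1 + ((vs.takeWhile (· == v)).length : Int))
        (by simp at hk ⊢; omega) (by omega) hdd
      rw [hcps]
      rw [show pvCps v (y :: ys) (j + 1 + ((vs.takeWhile (· == v)).length : Int))
          = (j + 1 + ((vs.takeWhile (· == v)).length : Int))
            :: pvCps y ys (j + 1 + ((vs.takeWhile (· == v)).length : Int) + 1) from by
        simp [pvCps, hyv]]
      simp only [List.cons_append, List.zip_cons_cons, List.map_cons]
      rw [hgv]
      exact congrArg₂ List.cons (by congr 1; omega) hrec

theorem pvB_eq_rle (x : Int) (xs : List Int) :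
    compute_sojourn_times_alt (x :: xs) = pvRle (x :: xs) := by
  simp only [compute_sojourn_times_alt]
  rw [pvFilt (x :: xs) xs x 1 (by omega) (by simp)]
  rw [show ([(0 : Int)] ++ pvCps x xs 1 ++ [(((x :: xs).length : Nat) : Int)])
      = (0 : Int) :: (pvCps x xs 1 ++ [(((x :: xs).length : Nat) : Int)]) from by simp]
  rw [pvZipMap (x :: xs) ((0 : Int) :: (pvCps x xs 1 ++ [(((x :: xs).length : Nat) : Int)]))]
  simp only [List.tail_cons]
  have h := pvMain (x :: xs) (x :: xs).length x xs 0 (le_refl _) (le_refl 0) (by simp)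
  simpa using h

-- ===== VERDICT (by name: the statement is the Claim_ definition above) =====
theorem compute_sojourn_times_spec : Claim_equal_compute_sojourn_times := by
  intro labels _ hpre
  unfold Spec_compute_sojourn_times
  match labels with
  | [] => exact absurd rfl hpre
  | x :: xs => rw [pvA_eq_rle, pvB_eq_rle]
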